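-- pv_equiv track=rewrite | github.com/osquery/osquery | tools/profile.py | regress_check
-- ===== SOURCE A (Python) =====
-- def regress_check(profile1, profile2):
--     regressed = False
--     for table in profile1:
--         if table not in profile2:
--             continue
--         for measure in profile1[table]:
--             if profile2[table][measure][0] > profile1[table][measure][0]:
--                 print ("%s %s has regressed (%s->%s)!" % (table, measure,
--                     profile1[table][measure][0], profile2[table][measure][0]))
--                 regressed = True
--     if not regressed:
--         print ("No regressions!")
--         return 0
--     return 1
-- ===== SOURCE B (Python) =====
-- def _count_measures(table, items, new_measures):
--     # recursion over the remaining (measure, vals) pairs; returns number of regressions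
--     if not items:
--         return 0
--     measure, vals = items[0]
--     old = vals[0]
--     new = new_measures[measure][0]
--     here = 0
--     if new > old:
--         print("%s %s has regressed (%s->%s)!" % (table, measure, old, new))
--         here = 1
--     return here + _count_measures(table, items[1:], new_measures)
--
--
-- def _count_tables(items, profile2):
--     # recursion over the remaining (table, measures) pairs; returns number of regressions
--     if not items:
--         return 0
--     table, measures = items[0]
--     if table in profile2:
--         here = _count_measures(table, list(measures.items()), profile2[table])
--     else:
--         here = 0
--     return here + _count_tables(items[1:], profile2)
--
--
-- def regress_check(profile1, profile2):
--     count = _count_tables(list(profile1.items()), profile2)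
--     if count == 0:
--         print("No regressions!")
--         return 0
--     return 1
-- ===== Notes on version B (the rewrite author's own statement) =====
-- stated objective: alternative
-- what changed: B replaces A's iterative nested loops with a mutable boolean flag by two structurally recursive helpers that COUNT regressions (recursing on the tail of the item lists), deriving the return value from whether the count is zero.
import Mathlib
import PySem

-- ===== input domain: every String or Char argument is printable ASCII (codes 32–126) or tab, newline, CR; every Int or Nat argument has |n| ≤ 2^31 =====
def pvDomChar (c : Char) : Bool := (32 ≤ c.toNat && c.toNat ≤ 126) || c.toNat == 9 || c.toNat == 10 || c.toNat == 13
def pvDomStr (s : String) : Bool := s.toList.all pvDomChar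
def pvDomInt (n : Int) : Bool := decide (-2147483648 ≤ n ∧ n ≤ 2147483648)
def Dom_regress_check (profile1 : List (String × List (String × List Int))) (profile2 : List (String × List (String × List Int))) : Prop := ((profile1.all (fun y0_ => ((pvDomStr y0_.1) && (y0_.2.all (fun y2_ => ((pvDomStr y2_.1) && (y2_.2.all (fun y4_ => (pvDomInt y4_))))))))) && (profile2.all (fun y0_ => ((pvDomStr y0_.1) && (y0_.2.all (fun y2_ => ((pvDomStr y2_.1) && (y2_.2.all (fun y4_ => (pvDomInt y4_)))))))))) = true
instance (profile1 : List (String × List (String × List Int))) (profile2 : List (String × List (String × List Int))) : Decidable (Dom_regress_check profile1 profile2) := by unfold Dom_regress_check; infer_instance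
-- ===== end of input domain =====

-- B replaces A's iterative nested loops with a mutable flag by two structurally recursive
-- helpers that COUNT regressions, deciding the return value from whether the count is zero
-- (alternative decomposition; same printed lines in the same order; the equivalence proved
-- is about the return value).

-- ===== PORT A =====
-- inner loop: for measure in profile1[table]: if profile2[table][measure][0] > …: regressed = True
def pvA_inner (d2 : PySem.Dict String (List (String × List Int)))
    (tm : String × List (String × List Int)) (regressed : Bool) : Bool :=
  (PySem.Dict.ofList tm.2).items.foldl (fun regressed me =>
    if PySem.List.pyGetD ((PySem.Dict.ofList (d2.getD tm.1 [])).getD me.1 []) 0 0 >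
       PySem.List.pyGetD me.2 0 0 then true   -- (print elided; return value only)
    else regressed) regressed

-- outer loop: for table in profile1: if table not in profile2: continue; …
def pvA_outer (d2 : PySem.Dict String (List (String × List Int)))
    (l : List (String × List (String × List Int))) (regressed : Bool) : Bool :=
  l.foldl (fun regressed tm =>
    if d2.contains tm.1 = false then regressed else pvA_inner d2 tm regressed) regressed

def regress_check (profile1 : List (String × List (String × List Int))) (profile2 : List (String × List (String × List Int))) : Int :=
  if pvA_outer (PySem.Dict.ofList profile2) (PySem.Dict.ofList profile1).items false = false
  then 0 else 1   -- if not regressed: print("No regressions!"); return 0 / return 1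

-- ===== PORT B =====
-- _count_measures: recursion over the remaining (measure, vals) pairs; number of regressions
def pvB_countMeasures (newMeasures : PySem.Dict String (List Int)) :
    List (String × List Int) → Int
  | [] => 0
  | me :: rest =>
    -- old = vals[0]; new = new_measures[measure][0]; here = 1 if new > old (print elided)
    (if PySem.List.pyGetD (newMeasures.getD me.1 []) 0 0 > PySem.List.pyGetD me.2 0 0
     then (1 : Int) else 0) + pvB_countMeasures newMeasures rest

-- _count_tables: recursion over the remaining (table, measures) pairs
def pvB_countTables (d2 : PySem.Dict String (List (String × List Int))) :
    List (String × List (String × List Int)) → Int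
  | [] => 0
  | tm :: rest =>
    (if d2.contains tm.1
     then pvB_countMeasures (PySem.Dict.ofList (d2.getD tm.1 [])) (PySem.Dict.ofList tm.2).items
     else 0) + pvB_countTables d2 rest

def regress_check_alt (profile1 : List (String × List (String × List Int))) (profile2 : List (String × List (String × List Int))) : Int :=
  let count := pvB_countTables (PySem.Dict.ofList profile2) (PySem.Dict.ofList profile1).items
  if count = 0 then 0 else 1   -- if count == 0: print("No regressions!"); return 0 / return 1

-- ===== PRECONDITION & SPEC =====
-- Pre_ excludes exactly the inputs on which Python A raises: a measure of a shared table
-- that is missing from profile2[table] (KeyError) or whose value list on either side is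
-- empty (IndexError on [0]).
def Pre_regress_check (profile1 : List (String × List (String × List Int))) (profile2 : List (String × List (String × List Int))) : Prop :=
  ∀ tm ∈ (PySem.Dict.ofList profile1).items,
    (PySem.Dict.ofList profile2).contains tm.1 = true →
    ∀ me ∈ (PySem.Dict.ofList tm.2).items,
      (PySem.Dict.ofList ((PySem.Dict.ofList profile2).getD tm.1 [])).contains me.1 = true ∧
      (PySem.Dict.ofList ((PySem.Dict.ofList profile2).getD tm.1 [])).getD me.1 [] ≠ [] ∧
      me.2 ≠ []
instance (profile1 : List (String × List (String × List Int))) (profile2 : List (String × List (String × List Int))) : Decidable (Pre_regress_check profile1 profile2) := by unfold Pre_regress_check; infer_instance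

def pvWitness_regress_check : (List (String × List (String × List Int))) × (List (String × List (String × List Int))) :=
  ([("t", [("m", [1]), ("n", [3])]), ("u", [("k", [5])])], [("t", [("m", [2]), ("n", [1])])])

def Spec_regress_check (profile1 : List (String × List (String × List Int))) (profile2 : List (String × List (String × List Int))) (out : Int) : Prop := out = regress_check_alt profile1 profile2
instance (profile1 : List (String × List (String × List Int))) (profile2 : List (String × List (String × List Int))) (out : Int) : Decidable (Spec_regress_check profile1 profile2 out) := by unfold Spec_regress_check; infer_instance

-- ===== CLAIM (what is proved, stated in full; the proofs are below) =====
def Claim_equal_regress_check : Prop := ∀ (profile1 : List (String × List (String × List Int))) (profile2 : List (String × List (String × List Int))), Dom_regress_check profile1 profile2 → Pre_regress_check profile1 profile2 → Spec_regress_check profile1 profile2 (regress_check profile1 profile2)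

-- ===== LEMMAS AND PROOFS =====

theorem pvB_countMeasures_nonneg (d : PySem.Dict String (List Int)) :
    ∀ l, 0 ≤ pvB_countMeasures d l := by
  intro l
  induction l with
  | nil => simp [pvB_countMeasures]
  | cons x xs ih =>
    simp only [pvB_countMeasures]
    split <;> omega

theorem pvB_countTables_nonneg (d2 : PySem.Dict String (List (String × List Int))) :
    ∀ l, 0 ≤ pvB_countTables d2 l := by
  intro l
  induction l with
  | nil => simp [pvB_countTables]
  | cons x xs ih =>
    simp only [pvB_countTables]
    have := pvB_countMeasures_nonneg (PySem.Dict.ofList (d2.getD x.1 [])) (PySem.Dict.ofList x.2).items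
    split <;> omega

-- A's inner flag loop equals: initial flag OR B's measure count is nonzero.
theorem pv_inner_eq_count (d2 : PySem.Dict String (List (String × List Int)))
    (tm : String × List (String × List Int)) :
    ∀ (l : List (String × List Int)) (r : Bool),
      l.foldl (fun regressed me =>
        if PySem.List.pyGetD ((PySem.Dict.ofList (d2.getD tm.1 [])).getD me.1 []) 0 0 >
           PySem.List.pyGetD me.2 0 0 then true else regressed) r
      = (r || decide (pvB_countMeasures (PySem.Dict.ofList (d2.getD tm.1 [])) l ≠ 0)) := by
  intro l
  induction l with
  | nil => simp [pvB_countMeasures]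
  | cons x xs ih =>
    intro r
    rw [List.foldl_cons, ih]
    simp only [pvB_countMeasures]
    have hxs := pvB_countMeasures_nonneg (PySem.Dict.ofList (d2.getD tm.1 [])) xs
    split
    · simp only [Bool.true_or]
      have : (1 : Int) + pvB_countMeasures (PySem.Dict.ofList (d2.getD tm.1 [])) xs ≠ 0 := by omega
      simp [this]
    · simp

-- A's outer flag loop equals: initial flag OR B's table count is nonzero.
theorem pv_outer_eq_count (d2 : PySem.Dict String (List (String × List Int))) :
    ∀ (l : List (String × List (String × List Int))) (r : Bool),
      pvA_outer d2 l r = (r || decide (pvB_countTables d2 l ≠ 0)) := by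
  intro l
  induction l with
  | nil => simp [pvA_outer, pvB_countTables]
  | cons tm rest ih =>
    intro r
    simp only [pvA_outer, List.foldl_cons] at *
    rw [ih]
    simp only [pvB_countTables]
    have hrest := pvB_countTables_nonneg d2 rest
    have hm := pvB_countMeasures_nonneg (PySem.Dict.ofList (d2.getD tm.1 [])) (PySem.Dict.ofList tm.2).items
    rcases Bool.eq_false_or_eq_true (d2.contains tm.1) with hb | hb
    · simp only [hb, if_neg (by simp : ¬(true = false))]
      unfold pvA_inner
      rw [pv_inner_eq_count d2 tm]
      by_cases h1 : pvB_countMeasures (PySem.Dict.ofList (d2.getD tm.1 [])) (PySem.Dict.ofList tm.2).items = 0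
      · simp [h1]
      · have h2 : pvB_countMeasures (PySem.Dict.ofList (d2.getD tm.1 [])) (PySem.Dict.ofList tm.2).items + pvB_countTables d2 rest ≠ 0 := by omega
        by_cases h3 : pvB_countTables d2 rest = 0 <;> simp [h1, h2, h3]
    · simp [hb]

theorem regress_check_eq_alt (profile1 profile2 : List (String × List (String × List Int))) :
    regress_check profile1 profile2 = regress_check_alt profile1 profile2 := by
  unfold regress_check regress_check_alt
  rw [pv_outer_eq_count]
  simp only [Bool.false_or]
  by_cases h : pvB_countTables (PySem.Dict.ofList profile2) (PySem.Dict.ofList profile1).items = 0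
  · simp [h]
  · simp [h]

-- ===== VERDICT (by name: the statement is the Claim_ definition above) =====
theorem regress_check_spec : Claim_equal_regress_check := by
  intro p1 p2 _ _
  unfold Spec_regress_check
  exact regress_check_eq_alt p1 p2
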